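-- pv_equiv track=rewrite | github.com/Fayol-01/MiragePot | miragepot/ttp_detector.py | _matches_chain
-- ===== SOURCE A (Python) =====
-- from typing import Any, Dict, List, Optional, Set, Tuple
--
-- def _matches_chain(history: List[str], chain: List[str]) -> bool:
--     """Check if command history contains the chain pattern.
--
--     The chain commands don't need to be consecutive, just in order.
--     """
--     chain_idx = 0
--     for cmd in history:
--         if chain_idx >= len(chain):
--             break
--         # Check if current command matches current chain element (substring match)
--         if chain[chain_idx].lower() in cmd.lower():
--             chain_idx += 1
--
--     return chain_idx >= len(chain)
-- ===== SOURCE B (Python) =====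
-- def _matches_chain(history, chain):
--     """Check if command history contains the chain pattern (in order, not
--     necessarily consecutive): scan the history BACK-TO-FRONT, maintaining the
--     stack of still-unmatched chain elements and popping its top (the last
--     unmatched chain element) whenever the current command contains it.
--     Correct because an ordered embedding of chain into history exists iff the
--     reversed chain embeds into the reversed history."""
--     remaining = list(chain)
--     for cmd in reversed(history):
--         if remaining and remaining[-1].lower() in cmd.lower():
--             remaining.pop()
--     return not remaining
-- ===== Notes on version B (the rewrite author's own statement) =====
-- stated objective: alternative
-- what changed: Replaced A's forward loop with an advancing index pointer and break by a backward scan of the history that maintains a stack of still-unmatched chain elements, popping matches from its top; correctness rests on the proved fact that an ordered embedding exists iff one exists for the reversed lists.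
import Mathlib
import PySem

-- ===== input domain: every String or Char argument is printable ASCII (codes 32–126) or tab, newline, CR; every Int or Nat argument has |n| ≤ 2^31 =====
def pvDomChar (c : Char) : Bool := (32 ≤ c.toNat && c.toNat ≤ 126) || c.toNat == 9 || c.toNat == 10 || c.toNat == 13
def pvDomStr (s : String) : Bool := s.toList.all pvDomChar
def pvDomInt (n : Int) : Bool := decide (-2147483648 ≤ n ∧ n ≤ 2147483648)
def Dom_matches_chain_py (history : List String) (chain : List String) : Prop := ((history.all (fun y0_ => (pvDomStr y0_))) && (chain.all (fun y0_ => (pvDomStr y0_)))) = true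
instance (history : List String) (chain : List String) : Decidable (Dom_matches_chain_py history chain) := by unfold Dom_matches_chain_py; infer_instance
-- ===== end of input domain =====

-- B replaces A's forward pointer loop by a backward scan of the history maintaining a stack
-- of still-unmatched chain elements; equivalence rests on the proved fact that an ordered
-- embedding exists iff one exists for the reversed lists. Same cost, different traversal.

-- ===== PORT A =====
-- loop body: the 'break' leaves the remaining iterations as the identity on chain_idx,
-- so it is transcribed as the first branch returning chain_idx unchanged.
def aStep (chain : List String) (chain_idx : Nat) (cmd : String) : Nat :=
  if chain.length ≤ chain_idx then chain_idx
  else if PySem.Str.isIn (PySem.Str.lower ((PySem.List.pyGet? chain (chain_idx : Int)).getD "")) (PySem.Str.lower cmd) then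
    chain_idx + 1
  else chain_idx

def matches_chain_py (history : List String) (chain : List String) : Bool :=
  decide (chain.length ≤ history.foldl (aStep chain) 0)

-- ===== PORT B =====
-- loop body: 'if remaining and remaining[-1].lower() in cmd.lower(): remaining.pop()'
def bStep (remaining : List String) (cmd : String) : List String :=
  if (!remaining.isEmpty) && PySem.Str.isIn (PySem.Str.lower ((PySem.List.pyGet? remaining (-1)).getD "")) (PySem.Str.lower cmd)
  then remaining.dropLast
  else remaining

-- 'for cmd in reversed(history): …; return not remaining'
def matches_chain_py_alt (history : List String) (chain : List String) : Bool :=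
  (history.reverse.foldl bStep chain).isEmpty

-- ===== PRECONDITION & SPEC =====
def Spec_matches_chain_py (history : List String) (chain : List String) (out : Bool) : Prop := out = matches_chain_py_alt history chain
instance (history : List String) (chain : List String) (out : Bool) : Decidable (Spec_matches_chain_py history chain out) := by unfold Spec_matches_chain_py; infer_instance

-- ===== CLAIM =====
def Claim_equal_matches_chain_py : Prop := ∀ (history : List String) (chain : List String), Dom_matches_chain_py history chain → Spec_matches_chain_py history chain (matches_chain_py history chain)

-- ===== LEMMAS AND PROOFS =====

-- forward greedy matcher (proof-side reference; both ports are reduced to it)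
def goB : List String → List String → Bool
  | _, [] => true
  | [], _ :: _ => false
  | cmd :: rh, c :: cs =>
    if PySem.Str.isIn (PySem.Str.lower c) (PySem.Str.lower cmd) then goB rh cs
    else goB rh (c :: cs)

-- the substring-match predicate shared by both programs
def mtc (c cmd : String) : Bool := PySem.Str.isIn (PySem.Str.lower c) (PySem.Str.lower cmd)

-- an ordered embedding of the chain (2nd arg) into the history (1st arg)
inductive Emb : List String → List String → Prop
  | nil (h : List String) : Emb h []
  | take {c cmd : String} {hist cs : List String} :
      mtc c cmd = true → Emb hist cs → Emb (cmd :: hist) (c :: cs)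
  | skip {cmd : String} {hist ch : List String} :
      Emb hist ch → Emb (cmd :: hist) ch

lemma goB_nil_chain (h : List String) : goB h [] = true := by cases h <;> rfl

-- dropping the head of the chain preserves greedy success
lemma goB_drop : ∀ (hist : List String) (c : String) (cs : List String),
    goB hist (c :: cs) = true → goB hist cs = true := by
  intro hist
  induction hist with
  | nil => intro c cs h; simp [goB] at h
  | cons cmd hist ih =>
    intro c cs h
    by_cases hm : mtc c cmd = true
    · unfold mtc at hm
      simp only [goB] at h
      rw [if_pos hm] at h
      cases cs with
      | nil => exact goB_nil_chain _
      | cons c' cs' =>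
        simp only [goB]
        split
        · exact ih c' cs' h
        · exact h
    · unfold mtc at hm
      simp only [goB] at h
      rw [if_neg hm] at h
      cases cs with
      | nil => exact goB_nil_chain _
      | cons c' cs' =>
        have h1 : goB hist (c' :: cs') = true := ih c (c' :: cs') h
        simp only [goB]
        split
        · exact ih c' cs' h1
        · exact h1

-- prepending a command to the history preserves greedy success
lemma goB_cons_hist (cmd : String) (hist ch : List String)
    (h : goB hist ch = true) : goB (cmd :: hist) ch = true := by
  cases ch with
  | nil => rfl
  | cons c cs =>
    simp only [goB]
    split
    · exact goB_drop hist c cs h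
    · exact h

lemma goB_of_emb {hist ch : List String} (h : Emb hist ch) : goB hist ch = true := by
  induction h with
  | nil h => exact goB_nil_chain h
  | take hm _ ih => unfold mtc at hm; simp only [goB]; rw [if_pos hm]; exact ih
  | skip _ ih => exact goB_cons_hist _ _ _ ih

lemma emb_of_goB : ∀ (hist ch : List String), goB hist ch = true → Emb hist ch := by
  intro hist
  induction hist with
  | nil =>
    intro ch h
    cases ch with
    | nil => exact Emb.nil []
    | cons c cs => simp [goB] at h
  | cons cmd hist ih =>
    intro ch h
    cases ch with
    | nil => exact Emb.nil _
    | cons c cs =>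
      by_cases hm : mtc c cmd = true
      · have hm' := hm; unfold mtc at hm'
        simp only [goB] at h; rw [if_pos hm'] at h
        exact Emb.take hm (ih cs h)
      · have hm' := hm; unfold mtc at hm'
        simp only [goB] at h; rw [if_neg hm'] at h
        exact Emb.skip (ih (c :: cs) h)

lemma emb_snoc_skip {hist ch : List String} (cmd : String) (h : Emb hist ch) :
    Emb (hist ++ [cmd]) ch := by
  induction h with
  | nil h => exact Emb.nil _
  | take hm _ ih => exact Emb.take hm ih
  | skip _ ih => exact Emb.skip ih

lemma emb_single {c cmd : String} (hm : mtc c cmd = true) :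
    ∀ (h : List String), Emb (h ++ [cmd]) [c] := by
  intro h
  induction h with
  | nil => exact Emb.take hm (Emb.nil [])
  | cons x xs ih => exact Emb.skip ih

lemma emb_snoc_take {hist ch : List String} {c cmd : String}
    (h : Emb hist ch) (hm : mtc c cmd = true) :
    Emb (hist ++ [cmd]) (ch ++ [c]) := by
  induction h with
  | nil h => exact emb_single hm h
  | take hm' _ ih => exact Emb.take hm' ih
  | skip _ ih => exact Emb.skip ih

lemma emb_rev {hist ch : List String} (h : Emb hist ch) :
    Emb hist.reverse ch.reverse := by
  induction h with
  | nil h => exact Emb.nil _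
  | take hm _ ih => simpa using emb_snoc_take ih hm
  | skip _ ih => simpa using emb_snoc_skip _ ih

-- greedy on the reversed lists decides the same embedding
lemma goB_reverse (hist ch : List String) :
    goB hist.reverse ch.reverse = goB hist ch := by
  cases hb : goB hist ch with
  | true => exact goB_of_emb (emb_rev (emb_of_goB _ _ hb))
  | false =>
    cases hr : goB hist.reverse ch.reverse with
    | false => rfl
    | true =>
      have := goB_of_emb (by simpa using emb_rev (emb_of_goB _ _ hr))
      rw [hb] at this; exact this.symm

-- A's fold, started at index pre.length into chain = pre ++ rest, decides exactly the
-- forward greedy recursion on the remaining chain 'rest'.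
lemma aFold_eq_goB (history : List String) :
    ∀ (pre rest : List String),
      decide ((pre ++ rest).length ≤ history.foldl (aStep (pre ++ rest)) pre.length)
        = goB history rest := by
  induction history with
  | nil =>
    intro pre rest
    cases rest with
    | nil => simp [goB_nil_chain]
    | cons c cs => simp [goB]
  | cons cmd hist ih =>
    intro pre rest
    cases rest with
    | nil =>
      have hstep : aStep (pre ++ []) pre.length cmd = pre.length := by
        simp [aStep]
      simp only [List.foldl_cons, hstep]
      have := ih pre []
      simpa [goB_nil_chain] using this
    | cons c cs =>
      have hget : PySem.List.pyGet? (pre ++ c :: cs) ((pre.length : Int)) = some c := by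
        simp
      have hlen : ¬ (pre ++ c :: cs).length ≤ pre.length := by
        simp
      by_cases hin : PySem.Chars.isIn (PySem.Chars.lower c.toList) (PySem.Chars.lower cmd.toList) = true
      · have hstep : aStep (pre ++ c :: cs) pre.length cmd = pre.length + 1 := by
          unfold aStep
          rw [if_neg hlen, hget]
          simp [hin]
        have ihc := ih (pre ++ [c]) cs
        rw [show (pre ++ [c]) ++ cs = pre ++ c :: cs by simp,
            show (pre ++ [c]).length = pre.length + 1 by simp] at ihc
        simp only [List.foldl_cons, hstep, ihc]
        simp [goB, PySem.Str.isIn, PySem.Str.lower, hin]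
      · have hstep : aStep (pre ++ c :: cs) pre.length cmd = pre.length := by
          unfold aStep
          rw [if_neg hlen, hget]
          simp [hin]
        simp only [List.foldl_cons, hstep]
        rw [ih pre (c :: cs)]
        simp [goB, PySem.Str.isIn, PySem.Str.lower, hin]

lemma goB_nil_of_ne (l : List String) (h : l ≠ []) : goB [] l = false := by
  cases l with
  | nil => exact absurd rfl h
  | cons c cs => rfl

-- B's fold over the reversed history, maintaining the unmatched chain prefix as a stack,
-- decides exactly the greedy recursion on the reversed stack.
lemma bFold_eq_goB : ∀ (rh rem : List String),
    (rh.foldl bStep rem).isEmpty = goB rh rem.reverse := by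
  intro rh
  induction rh with
  | nil =>
    intro rem
    cases rem with
    | nil => rfl
    | cons r rs =>
      simp only [List.foldl_nil, List.isEmpty_cons, List.reverse_cons]
      exact (goB_nil_of_ne _ (by simp)).symm
  | cons cmd rh ih =>
    intro rem
    rcases List.eq_nil_or_concat rem with rfl | ⟨ds, x, rfl⟩
    · have hstep : bStep [] cmd = [] := by simp [bStep]
      rw [List.foldl_cons, hstep, ih []]
      simp [goB_nil_chain]
    · simp only [List.concat_eq_append]
      have hget : PySem.List.pyGet? (ds ++ [x]) (-1) = some x :=
        PySem.List.pyGet?_neg_one_append_singleton ds x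
      have hrev : (ds ++ [x]).reverse = x :: ds.reverse := by simp
      by_cases hin : PySem.Chars.isIn (PySem.Chars.lower x.toList) (PySem.Chars.lower cmd.toList) = true
      · have hstep : bStep (ds ++ [x]) cmd = ds := by
          simp [bStep, PySem.Str.isIn, PySem.Str.lower, hget, hin]
        rw [List.foldl_cons, hstep, ih ds, hrev]
        simp [goB, PySem.Str.isIn, PySem.Str.lower, hin]
      · have hstep : bStep (ds ++ [x]) cmd = ds ++ [x] := by
          simp [bStep, PySem.Str.isIn, PySem.Str.lower, hget, hin]
        rw [List.foldl_cons, hstep, ih (ds ++ [x]), hrev]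
        simp [goB, PySem.Str.isIn, PySem.Str.lower, hin]

-- ===== VERDICT =====
theorem matches_chain_py_spec : Claim_equal_matches_chain_py := by
  intro history chain _
  unfold Spec_matches_chain_py matches_chain_py matches_chain_py_alt
  rw [bFold_eq_goB, goB_reverse]
  simpa using aFold_eq_goB history [] chain
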